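-- pv_equiv track=rewrite | github.com/zhanghaha1707/STRUCK | utils/pattern.py | getStmtInsPos_tokens
-- ===== SOURCE A (Python) =====
-- def getStmtInsPos_tokens(StmtInsPos_line,token_stmts,strict=True):
--
--     res = []
--     indents=[]
--     cnt, indent = 0, 0
--     if not strict:
--         res.append(-1)
--         indents.append(0)
--     for i, stmt in enumerate(token_stmts):
--         cnt += len(stmt)
--         if stmt[-1] == "}":
--             indent = max(0,indent-1)
--         elif stmt[-1] == "{" and stmt[0] not in ["struct", "union", "enum", "typedef",'static']:
--             indent += 1
--         if i in StmtInsPos_line: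
--             if stmt[-1]!="}" and\
--                 indent>0 and\
--                 stmt[0] not in ['else', 'if'] and\
--                 not (stmt[0]=='for' and 'if' in stmt):
--                 res.append(cnt-1)
--                 indents.append(indent)
--             elif stmt[-1] == "}" and indent>1 and token_stmts[i+1][0] not in ['else',"while"] :
--                 res.append(cnt-1)
--                 indents.append(indent)
--             elif stmt[-1]=="{" and stmt[0] not in ["struct", "union", "enum", "typedef","switch",'static']:
--                 res.append(cnt-1)
--                 indents.append(indent)
--     if not strict and cnt-1 not in res:
--         res.append(cnt-1)
--         indents.append(0)
--     return res,indents
-- ===== SOURCE B (Python) =====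
-- def getStmtInsPos_tokens(StmtInsPos_line, token_stmts, strict=True):
--     n = len(token_stmts)
--     # first pass: prefix token counts and indent depth after each statement
--     prefix, indent_at = [], []
--     c, ind = 0, 0
--     for stmt in token_stmts:
--         c += len(stmt)
--         prefix.append(c)
--         if stmt[-1] == "}":
--             ind = max(0, ind - 1)
--         elif stmt[-1] == "{" and stmt[0] not in ("struct", "union", "enum", "typedef", "static"):
--             ind += 1
--         indent_at.append(ind)
--     res, indents = ([], []) if strict else ([-1], [0])
--     # second pass: only over the candidate positions, in statement order
--     for i in sorted({p for p in StmtInsPos_line if 0 <= p < n}):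
--         stmt = token_stmts[i]
--         d = indent_at[i]
--         ok = (stmt[-1] != "}" and d > 0 and stmt[0] not in ("else", "if")
--               and not (stmt[0] == "for" and "if" in stmt)) \
--             or (stmt[-1] == "}" and d > 1 and token_stmts[i + 1][0] not in ("else", "while")) \
--             or (stmt[-1] == "{" and stmt[0] not in ("struct", "union", "enum", "typedef", "switch", "static"))
--         if ok:
--             res.append(prefix[i] - 1)
--             indents.append(d)
--     if not strict and c - 1 not in res:
--         res.append(c - 1)
--         indents.append(0)
--     return res, indents
-- ===== Notes on version B (the rewrite author's own statement) =====
-- stated objective: faster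
-- what changed: A single stateful pass that tests 'i in StmtInsPos_line' for every statement is replaced by two table-building passes (prefix token counts and indent depth per statement) plus a loop over only the sorted deduplicated in-range candidate positions, turning the O(n*m) membership scans into O(n + m log m) table lookups.
import Mathlib
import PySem

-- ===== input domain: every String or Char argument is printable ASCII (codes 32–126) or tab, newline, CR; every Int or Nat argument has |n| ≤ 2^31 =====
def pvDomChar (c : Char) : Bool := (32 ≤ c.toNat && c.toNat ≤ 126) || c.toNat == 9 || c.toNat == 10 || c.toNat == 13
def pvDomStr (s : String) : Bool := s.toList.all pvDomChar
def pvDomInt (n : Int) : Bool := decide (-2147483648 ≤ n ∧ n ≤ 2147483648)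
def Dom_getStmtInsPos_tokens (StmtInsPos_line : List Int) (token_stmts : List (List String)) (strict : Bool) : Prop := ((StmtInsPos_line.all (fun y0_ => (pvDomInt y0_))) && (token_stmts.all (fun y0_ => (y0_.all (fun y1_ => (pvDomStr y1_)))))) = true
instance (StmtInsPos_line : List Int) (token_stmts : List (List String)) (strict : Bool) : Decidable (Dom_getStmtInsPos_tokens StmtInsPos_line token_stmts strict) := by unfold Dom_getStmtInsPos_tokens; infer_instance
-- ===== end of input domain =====

-- B replaces A's single stateful pass with its per-statement membership test by two table-building
-- passes plus a loop over the sorted deduplicated in-range candidate positions (objective: faster).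

-- shared token accessors: stmt[-1] / stmt[0]; the .getD "" default is reached only where Python raises (outside Pre_)
def pyLastTok (stmt : List String) : String := (PySem.List.pyGet? stmt (-1)).getD ""
def pyFirstTok (stmt : List String) : String := (PySem.List.pyGet? stmt 0).getD ""

-- ===== PORT A =====
def aBody (pos : List Int) (full : List (List String))
    (st : List Int × List Int × Int × Int) (pr : Int × List String) : List Int × List Int × Int × Int :=
  let res := st.1
  let inds := st.2.1
  let cnt := st.2.2.1 + (pr.2.length : Int)
  let indent :=
    if pyLastTok pr.2 == "}" then max 0 (st.2.2.2 - 1)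
    else if pyLastTok pr.2 == "{" && !(["struct","union","enum","typedef","static"].contains (pyFirstTok pr.2)) then st.2.2.2 + 1
    else st.2.2.2
  if pos.contains pr.1 then
    if pyLastTok pr.2 != "}" && decide (0 < indent) && !(["else","if"].contains (pyFirstTok pr.2)) &&
        !(pyFirstTok pr.2 == "for" && pr.2.contains "if") then
      (res ++ [cnt - 1], inds ++ [indent], cnt, indent)
    else if pyLastTok pr.2 == "}" && decide (1 < indent) &&
        !(["else","while"].contains ((PySem.List.pyGet? ((PySem.List.pyGet? full (pr.1 + 1)).getD []) 0).getD "")) then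
      (res ++ [cnt - 1], inds ++ [indent], cnt, indent)
    else if pyLastTok pr.2 == "{" && !(["struct","union","enum","typedef","switch","static"].contains (pyFirstTok pr.2)) then
      (res ++ [cnt - 1], inds ++ [indent], cnt, indent)
    else (res, inds, cnt, indent)
  else (res, inds, cnt, indent)

def getStmtInsPos_tokens (StmtInsPos_line : List Int) (token_stmts : List (List String)) (strict : Bool) : List Int × List Int :=
  let init : List Int × List Int := if !strict then ([-1], [0]) else ([], [])
  let st := (PySem.List.enumerate token_stmts 0).foldl (aBody StmtInsPos_line token_stmts) (init.1, init.2, 0, 0)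
  if !strict && !(st.1.contains (st.2.2.1 - 1)) then (st.1 ++ [st.2.2.1 - 1], st.2.1 ++ [0]) else (st.1, st.2.1)

-- ===== PORT B =====
def bFirstPass (st : List Int × List Int × Int × Int) (stmt : List String) : List Int × List Int × Int × Int :=
  let c := st.2.2.1 + (stmt.length : Int)
  let ind :=
    if pyLastTok stmt == "}" then max 0 (st.2.2.2 - 1)
    else if pyLastTok stmt == "{" && !(["struct","union","enum","typedef","static"].contains (pyFirstTok stmt)) then st.2.2.2 + 1
    else st.2.2.2
  (st.1 ++ [c], st.2.1 ++ [ind], c, ind)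

def bOk (full : List (List String)) (indat : List Int) (i : Int) : Bool :=
  let stmt := (PySem.List.pyGet? full i).getD []
  let d := (PySem.List.pyGet? indat i).getD 0
  (pyLastTok stmt != "}" && decide (0 < d) && !(["else","if"].contains (pyFirstTok stmt)) &&
      !(pyFirstTok stmt == "for" && stmt.contains "if"))
  || (pyLastTok stmt == "}" && decide (1 < d) &&
      !(["else","while"].contains ((PySem.List.pyGet? ((PySem.List.pyGet? full (i + 1)).getD []) 0).getD "")))
  || (pyLastTok stmt == "{" && !(["struct","union","enum","typedef","switch","static"].contains (pyFirstTok stmt)))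

def getStmtInsPos_tokens_alt (StmtInsPos_line : List Int) (token_stmts : List (List String)) (strict : Bool) : List Int × List Int :=
  let n : Int := token_stmts.length
  let fp := token_stmts.foldl bFirstPass ([], [], 0, 0)
  let pfx := fp.1
  let indat := fp.2.1
  let c := fp.2.2.1
  let start : List Int × List Int := if strict then ([], []) else ([-1], [0])
  let cand := PySem.List.sorted (PySem.Set.ofList (StmtInsPos_line.filter (fun p => decide (0 ≤ p) && decide (p < n)))) (fun x => x) false
  let st := cand.foldl (fun (st : List Int × List Int) i =>
      if bOk token_stmts indat i then
        (st.1 ++ [(PySem.List.pyGet? pfx i).getD 0 - 1], st.2 ++ [(PySem.List.pyGet? indat i).getD 0])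
      else st) start
  if !strict && !(st.1.contains (c - 1)) then (st.1 ++ [c - 1], st.2 ++ [0]) else st

-- ===== PRECONDITION & SPEC =====
-- the indent update both programs apply after each statement (used by Pre_ to state A's crash condition exactly)
def pvUpd (d : Int) (stmt : List String) : Int :=
  if pyLastTok stmt == "}" then max 0 (d - 1)
  else if pyLastTok stmt == "{" && !(["struct","union","enum","typedef","static"].contains (pyFirstTok stmt)) then d + 1
  else d

-- Pre_ excludes exactly the inputs on which Python A raises IndexError: some statement is empty (stmt[-1]),
-- or the last statement ends in "}" while its index is an insertion position and the brace-nesting depth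
-- after it exceeds 1 (then A's token_stmts[i+1] lookup is out of range). Python B raises identically there.
def Pre_getStmtInsPos_tokens (StmtInsPos_line : List Int) (token_stmts : List (List String)) (strict : Bool) : Prop :=
  (∀ stmt ∈ token_stmts, stmt ≠ []) ∧
  ¬ ((((token_stmts.length : Int) - 1) ∈ StmtInsPos_line) ∧
     (token_stmts.getLast?.getD []).getLast? = some "}" ∧
     1 < token_stmts.foldl pvUpd 0)
instance (StmtInsPos_line : List Int) (token_stmts : List (List String)) (strict : Bool) : Decidable (Pre_getStmtInsPos_tokens StmtInsPos_line token_stmts strict) := by unfold Pre_getStmtInsPos_tokens; infer_instance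

def pvWitness_getStmtInsPos_tokens : List Int × List (List String) × Bool :=
  ([0, 1], [["int","main","(",")","{"], ["x","=","1",";"], ["}"]], true)

def Spec_getStmtInsPos_tokens (StmtInsPos_line : List Int) (token_stmts : List (List String)) (strict : Bool) (out : List Int × List Int) : Prop := out = getStmtInsPos_tokens_alt StmtInsPos_line token_stmts strict
instance (StmtInsPos_line : List Int) (token_stmts : List (List String)) (strict : Bool) (out : List Int × List Int) : Decidable (Spec_getStmtInsPos_tokens StmtInsPos_line token_stmts strict out) := by unfold Spec_getStmtInsPos_tokens; infer_instance

-- ===== CLAIM (what is proved, stated in full; the proofs are below) =====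
def Claim_equal_getStmtInsPos_tokens : Prop := ∀ (StmtInsPos_line : List Int) (token_stmts : List (List String)) (strict : Bool), Dom_getStmtInsPos_tokens StmtInsPos_line token_stmts strict → Pre_getStmtInsPos_tokens StmtInsPos_line token_stmts strict → Spec_getStmtInsPos_tokens StmtInsPos_line token_stmts strict (getStmtInsPos_tokens StmtInsPos_line token_stmts strict)

-- ===== LEMMAS AND PROOFS =====

-- per-statement rows: (index, stmt, running token count AFTER the stmt, indent AFTER the stmt)
def pvRows : List (List String) → Int → Int → Int → List (Int × List String × Int × Int)
  | [], _, _, _ => []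
  | stmt :: rest, i, c, d =>
    (i, stmt, c + (stmt.length : Int), pvUpd d stmt) :: pvRows rest (i + 1) (c + (stmt.length : Int)) (pvUpd d stmt)

-- the acceptance guard expressed on a row
def pvG (full : List (List String)) (r : Int × List String × Int × Int) : Bool :=
  (pyLastTok r.2.1 != "}" && decide (0 < r.2.2.2) && !(["else","if"].contains (pyFirstTok r.2.1)) &&
      !(pyFirstTok r.2.1 == "for" && r.2.1.contains "if"))
  || (pyLastTok r.2.1 == "}" && decide (1 < r.2.2.2) &&
      !(["else","while"].contains ((PySem.List.pyGet? ((PySem.List.pyGet? full (r.1 + 1)).getD []) 0).getD "")))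
  || (pyLastTok r.2.1 == "{" && !(["struct","union","enum","typedef","switch","static"].contains (pyFirstTok r.2.1)))

theorem pvRows_length (stmts : List (List String)) : ∀ (i c d : Int), (pvRows stmts i c d).length = stmts.length := by
  induction stmts with
  | nil => intro i c d; rfl
  | cons s rest ih => intro i c d; simp [pvRows, ih]

theorem aLoop (pos : List Int) (full : List (List String)) (stmts : List (List String)) :
    ∀ (i c d : Int) (res inds : List Int),
    (PySem.List.enumerate stmts i).foldl (aBody pos full) (res, inds, c, d)
    = (res ++ (((pvRows stmts i c d).filter (fun r => pos.contains r.1 && pvG full r)).map (fun r => r.2.2.1 - 1)),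
       inds ++ (((pvRows stmts i c d).filter (fun r => pos.contains r.1 && pvG full r)).map (fun r => r.2.2.2)),
       c + ((stmts.map (fun s : List String => (s.length : Int))).sum),
       stmts.foldl pvUpd d) := by
  induction stmts with
  | nil => intro i c d res inds; simp [PySem.List.enumerate_nil, pvRows]
  | cons s rest ih =>
    intro i c d res inds
    rw [PySem.List.enumerate_cons, List.foldl_cons]
    have hbody : aBody pos full (res, inds, c, d) (i, s)
        = (if pos.contains i && pvG full (i, s, c + (s.length : Int), pvUpd d s) then
            (res ++ [c + (s.length : Int) - 1], inds ++ [pvUpd d s], c + (s.length : Int), pvUpd d s)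
          else (res, inds, c + (s.length : Int), pvUpd d s)) := by
      simp only [aBody, pvG, pvUpd]
      by_cases hm : i ∈ pos
      · simp only [List.contains_iff_mem]
        split_ifs with h1 h2 h3 <;> simp_all <;> tauto
      · simp [hm]
    rw [hbody]
    by_cases hacc : (pos.contains i && pvG full (i, s, c + (s.length : Int), pvUpd d s)) = true
    · rw [if_pos hacc, ih (i + 1)]
      simp only [pvRows, List.filter_cons, hacc, if_pos, List.map_cons, List.map_cons]
      simp [List.append_assoc]
      omega
    · rw [if_neg hacc, ih (i + 1)]
      simp only [pvRows, List.filter_cons]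
      have hacc2 : ¬(i ∈ pos ∧ pvG full (i, s, c + (s.length : Int), pvUpd d s) = true) := by
        simpa using hacc
      simp [hacc2]
      omega

theorem bFirst (stmts : List (List String)) :
    ∀ (i c d : Int) (pfx ind : List Int),
    stmts.foldl bFirstPass (pfx, ind, c, d)
    = (pfx ++ (pvRows stmts i c d).map (fun r => r.2.2.1),
       ind ++ (pvRows stmts i c d).map (fun r => r.2.2.2),
       c + ((stmts.map (fun s : List String => (s.length : Int))).sum),
       stmts.foldl pvUpd d) := by
  induction stmts with
  | nil => intro i c d pfx ind; simp [pvRows]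
  | cons s rest ih =>
    intro i c d pfx ind
    simp only [List.foldl_cons, bFirstPass, pvRows, List.map_cons, List.map_cons]
    rw [ih (i + 1)]
    simp [pvUpd, List.append_assoc]
    ring

theorem bLoop (g : Int → Bool) (f1 f2 : Int → Int) :
    ∀ (L : List Int) (r q : List Int),
    L.foldl (fun (st : List Int × List Int) i => if g i then (st.1 ++ [f1 i], st.2 ++ [f2 i]) else st) (r, q)
    = (r ++ (L.filter g).map f1, q ++ (L.filter g).map f2) := by
  intro L
  induction L with
  | nil => intro r q; simp
  | cons x t ih =>
    intro r q
    by_cases hx : g x = true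
    · simp [hx, ih, List.append_assoc]
    · simp [hx, ih]

theorem pvRows_map_fst (stmts : List (List String)) :
    ∀ (i c d : Int), (pvRows stmts i c d).map (fun r => r.1) = PySem.List.pyRange i (i + (stmts.length : Int)) 1 := by
  induction stmts with
  | nil => intro i c d; simp [pvRows, PySem.List.pyRange_one_eq_nil]
  | cons s rest ih =>
    intro i c d
    have h : i < i + ((s :: rest).length : Int) := by simp only [List.length_cons]; push_cast; omega
    rw [PySem.List.pyRange_one_cons h]
    simp only [pvRows, List.map_cons, ih (i + 1)]
    congr 1
    congr 1
    · simp; omega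

theorem pvRows_getElem_fst (stmts : List (List String)) :
    ∀ (i c d : Int) (k : Nat) (h : k < (pvRows stmts i c d).length), ((pvRows stmts i c d)[k]).1 = i + k := by
  induction stmts with
  | nil => intro i c d k h; simp [pvRows] at h
  | cons s rest ih =>
    intro i c d k h
    cases k with
    | zero => simp [pvRows]
    | succ m =>
      simp only [pvRows, List.getElem_cons_succ]
      rw [ih (i + 1)]
      push_cast
      ring

theorem pvRows_getElem_stmt (stmts : List (List String)) :
    ∀ (i c d : Int) (k : Nat) (h : k < (pvRows stmts i c d).length) (h' : k < stmts.length),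
    ((pvRows stmts i c d)[k]).2.1 = stmts[k] := by
  induction stmts with
  | nil => intro i c d k h h'; simp [pvRows] at h
  | cons s rest ih =>
    intro i c d k h h'
    cases k with
    | zero => simp [pvRows]
    | succ m => simp only [pvRows, List.getElem_cons_succ]; apply ih

-- sorted({p for p in pos if 0 <= p < n}) is exactly the in-range indices in increasing order
theorem pvCand (pos : List Int) (n : Int) :
    PySem.List.sorted (PySem.Set.ofList (pos.filter (fun p => decide (0 ≤ p) && decide (p < n)))) (fun x => x) false
    = (PySem.List.pyRange 0 n 1).filter (fun p => pos.contains p) := by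
  apply PySem.List.sorted_eq_of_perm_of_pairwise_lt
  · rw [List.perm_ext_iff_of_nodup]
    · intro a
      simp [PySem.List.mem_pyRange_one, PySem.Set.mem_ofList]
      tauto
    · exact (PySem.List.pairwise_lt_pyRange_one 0 n).nodup.filter _
    · exact PySem.Set.nodup_ofList _
  · exact (PySem.List.pairwise_lt_pyRange_one 0 n).filter _

theorem pvLookup {A : Type} (stmts : List (List String)) (f : Int × List String × Int × Int → A) (dflt : A)
    (r : Int × List String × Int × Int) (hr : r ∈ pvRows stmts 0 0 0) :
    (PySem.List.pyGet? ((pvRows stmts 0 0 0).map f) r.1).getD dflt = f r := by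
  obtain ⟨k, hk, hEq⟩ := List.mem_iff_getElem.mp hr
  have h1 : r.1 = (k : Int) := by rw [← hEq, pvRows_getElem_fst]; simp
  rw [h1, PySem.List.pyGet?_natCast]
  rw [List.getElem?_eq_getElem (by simpa using hk)]
  simp [← hEq]

theorem pvLookupStmt (stmts : List (List String))
    (r : Int × List String × Int × Int) (hr : r ∈ pvRows stmts 0 0 0) :
    (PySem.List.pyGet? stmts r.1).getD [] = r.2.1 := by
  obtain ⟨k, hk, hEq⟩ := List.mem_iff_getElem.mp hr
  have h1 : r.1 = (k : Int) := by rw [← hEq, pvRows_getElem_fst]; simp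
  have h2 : k < stmts.length := by rw [pvRows_length] at hk; exact hk
  rw [h1, PySem.List.pyGet?_natCast, List.getElem?_eq_getElem h2]
  rw [← hEq, pvRows_getElem_stmt stmts 0 0 0 k hk h2]
  rfl

theorem pvOkRows (stmts : List (List String))
    (r : Int × List String × Int × Int) (hr : r ∈ pvRows stmts 0 0 0) :
    bOk stmts ((pvRows stmts 0 0 0).map (fun r => r.2.2.2)) r.1 = pvG stmts r := by
  simp only [bOk, pvG]
  rw [pvLookupStmt stmts r hr, pvLookup stmts (fun r => r.2.2.2) 0 r hr]

theorem pvListEq (pos : List Int) (stmts : List (List String)) (f : Int × List String × Int × Int → Int)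
    (F : Int → Int) (hF : ∀ r ∈ pvRows stmts 0 0 0, F r.1 = f r) :
    (((PySem.List.pyRange 0 (stmts.length : Int) 1).filter (fun p => pos.contains p)).filter
        (bOk stmts ((pvRows stmts 0 0 0).map (fun r => r.2.2.2)))).map F
    = ((pvRows stmts 0 0 0).filter (fun r => pos.contains r.1 && pvG stmts r)).map f := by
  have h0 : PySem.List.pyRange 0 (stmts.length : Int) 1 = (pvRows stmts 0 0 0).map (fun r => r.1) := by
    rw [pvRows_map_fst]; norm_num
  rw [h0, List.filter_map, List.filter_map, List.map_map, List.filter_filter]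
  have hfil : (pvRows stmts 0 0 0).filter
        (fun a => ((bOk stmts ((pvRows stmts 0 0 0).map (fun r => r.2.2.2))) ∘ (fun (r : Int × List String × Int × Int) => r.1)) a &&
          ((fun p => pos.contains p) ∘ (fun (r : Int × List String × Int × Int) => r.1)) a)
      = (pvRows stmts 0 0 0).filter (fun r => pos.contains r.1 && pvG stmts r) := by
    apply List.filter_congr
    intro r hr
    simp only [Function.comp_apply, pvOkRows stmts r hr, Bool.and_comm]
  rw [hfil]
  apply List.map_congr_left
  intro r hr
  simpa using hF r (List.mem_of_mem_filter hr)

-- ===== VERDICT (by name: the statement is the Claim_ definition above) =====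
theorem getStmtInsPos_tokens_spec : Claim_equal_getStmtInsPos_tokens := by
  intro pos stmts strict _ _
  unfold Spec_getStmtInsPos_tokens getStmtInsPos_tokens getStmtInsPos_tokens_alt
  dsimp only
  rw [aLoop pos stmts stmts 0 0 0, bFirst stmts 0 0 0 [] [], bLoop, pvCand]
  have e1 := pvListEq pos stmts (fun r => r.2.2.1 - 1)
      (fun i => (PySem.List.pyGet? ((pvRows stmts 0 0 0).map (fun r => r.2.2.1)) i).getD 0 - 1)
      (fun r hr => by simpa using pvLookup stmts (fun r => r.2.2.1) 0 r hr)
  have e2 := pvListEq pos stmts (fun r => r.2.2.2)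
      (fun i => (PySem.List.pyGet? ((pvRows stmts 0 0 0).map (fun r => r.2.2.2)) i).getD 0)
      (fun r hr => by simpa using pvLookup stmts (fun r => r.2.2.2) 0 r hr)
  simp only [List.nil_append]
  rw [e1, e2]
  cases strict <;> simp
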